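-- pv_equiv track=rewrite | github.com/c0re-i5/sort-explorer | 09_bitwise_and_novel_sorts.py | gravity_sort_bitparallel
-- ===== SOURCE A (Python) =====
-- def popcount(x):
--     """Count the number of 1-bits. [← repo 4: bit-tricks]"""
--     count = 0
--     while x:
--         count += 1
--         x &= x - 1  # Brian Kernighan's trick
--     return count
--
-- def gravity_sort_bitparallel(arr):
--     """Bit-parallel gravity sort: columns packed into integers.
--
--     Each column is a single integer where bit i = 1 means row i has a bead.
--     Gravity = popcount to count beads, then create a mask with that many
--     lowest bits set (packed to the bottom rows).
--     """
--     if not arr: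
--         return []
--     max_val = max(arr)
--     if max_val == 0:
--         return arr[:]
--     n = len(arr)
--
--     # Pack columns into integers: column[j] has bit i set if arr[i] >= j+1
--     columns = [0] * max_val
--     for i, val in enumerate(arr):
--         for j in range(val):
--             columns[j] |= (1 << i)
--
--     # Gravity: count bits, pack to bottom (highest row indices)
--     for j in range(max_val):
--         count = popcount(columns[j])
--         # Set the bottom 'count' rows: bits (n-count) through (n-1)
--         columns[j] = ((1 << count) - 1) << (n - count)
--
--     # Read back: value of row i = number of columns where bit i is set
--     result = [0] * n
--     for j in range(max_val):
--         col = columns[j]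
--         for i in range(n):
--             if col & (1 << i):
--                 result[i] += 1
--
--     return result
-- ===== SOURCE B (Python) =====
-- def gravity_sort_bitparallel(arr):
--     """Gravity (bead) sort with explicit pole heights: drop each value's beads
--     onto the poles, then read row i as the number of poles at least n-i high."""
--     if not arr:
--         return []
--     n = len(arr)
--     poles = [0] * max(arr)
--     for v in arr:
--         for j in range(v):
--             poles[j] += 1
--     return [sum(1 for h in poles if h >= n - i) for i in range(n)]
-- ===== Notes on version B (the rewrite author's own statement) =====
-- stated objective: faster
-- what changed: Replaces the bit-parallel bead sort (columns packed into big integers, Kernighan popcount, mask rebuild, per-bit read-back) by the classic bead sort on explicit integer pole heights with a counting read-back, avoiding all n-bit big-integer bitwise work; Pre_ excludes only lists whose maximum is 0 but that contain a negative value, a corner outside the bead-sort domain where A's max==0 early exit returns the list unchanged while B's gravity read-back yields all zeros.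
-- outside the precondition, e.g. on gravity_sort_bitparallel([-1, 0]): A returns [-1, 0], B returns [0, 0]
import Mathlib
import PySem

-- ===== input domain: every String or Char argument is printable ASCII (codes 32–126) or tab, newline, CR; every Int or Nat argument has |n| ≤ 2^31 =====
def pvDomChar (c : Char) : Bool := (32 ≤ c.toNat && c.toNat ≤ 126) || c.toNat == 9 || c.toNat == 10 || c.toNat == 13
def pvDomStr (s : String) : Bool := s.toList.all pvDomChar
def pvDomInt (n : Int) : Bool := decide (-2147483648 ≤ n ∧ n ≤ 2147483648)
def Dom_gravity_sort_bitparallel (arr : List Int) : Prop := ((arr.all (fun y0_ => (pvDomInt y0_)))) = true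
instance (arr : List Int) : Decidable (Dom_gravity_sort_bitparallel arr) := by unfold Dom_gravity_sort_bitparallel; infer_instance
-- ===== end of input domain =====

-- B replaces A's bit-packed bead sort (big-integer column masks, Kernighan
-- popcounts, per-bit read-back) by the classic bead sort on explicit integer pole
-- heights with a counting read-back; equal on every input except one excluded corner.

-- ===== PORT A =====

-- termination helper for pvPop (cited by its decreasing_by)
theorem pvPop_dec {x : Int} (h : 0 < x) : (PySem.Int.band x (x - 1)).toNat < x.toNat := by
  obtain ⟨m, rfl⟩ : ∃ m : Nat, x = (m : Int) := ⟨x.toNat, by omega⟩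
  have h1 : (m : Int) - 1 = ((m - 1 : Nat) : Int) := by omega
  rw [h1, PySem.Int.band_natCast]
  have := @Nat.and_le_right m (m - 1)
  omega

-- port of popcount: Kernighan loop; Python diverges for x < 0, which is
-- unreachable here (column masks are always ≥ 0)
def pvPop (x : Int) (count : Int) : Int :=
  if h : 0 < x then pvPop (PySem.Int.band x (x - 1)) (count + 1) else count
termination_by x.toNat
decreasing_by exact pvPop_dec h

def gravity_sort_bitparallel (arr : List Int) : List Int :=
  if arr = [] then [] else
  match PySem.List.max? arr (fun x => x) with
  | none => []        -- unreachable: arr ≠ []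
  | some max_val =>
    if max_val = 0 then arr else
    let n : Int := (arr.length : Int)
    -- columns = [0] * max_val
    let columns0 : List Int := List.replicate max_val.toNat 0
    -- for i, val in enumerate(arr): for j in range(val): columns[j] |= (1 << i)
    -- ((1 << i) with i ≥ 0 from enumerate: shifting by i.toNat is exact)
    let columns1 : List Int := (PySem.List.enumerate arr).foldl (fun cols iv =>
        (PySem.List.pyRange 0 iv.2 1).foldl (fun c j =>
            PySem.List.pySetD c j (PySem.Int.bor (PySem.List.pyGetD c j 0) ((1:Int) <<< iv.1.toNat))) cols)
      columns0
    -- for j in range(max_val): columns[j] = ((1 << count) - 1) << (n - count)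
    -- (entrywise rewrite of the list; count = popcount(columns[j]) ∈ [0, n], so
    --  both shift amounts are ≥ 0 and .toNat is exact)
    let columns2 : List Int := columns1.map (fun col =>
        let count := pvPop col 0
        ((1:Int) <<< count.toNat - 1) <<< (n - count).toNat)
    -- result = [0]*n; for j in range(max_val): for i in range(n): if col & (1<<i): result[i] += 1
    -- (the j-loop reads columns[j] for j in range(max_val): exactly the entries of columns2)
    columns2.foldl (fun res col =>
        (List.range arr.length).foldl (fun r (i : Nat) =>
            if PySem.Int.band col ((1:Int) <<< i) ≠ 0 then r.modify i (· + 1) else r) res)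
      (List.replicate arr.length 0)

-- ===== PORT B =====
def gravity_sort_bitparallel_alt (arr : List Int) : List Int :=
  if arr = [] then [] else
  match PySem.List.max? arr (fun x => x) with
  | none => []        -- unreachable: arr ≠ []
  | some m =>
    let n := arr.length
    -- poles = [0] * max(arr); for v in arr: for j in range(v): poles[j] += 1
    -- (Python's [0]*m is [] for m < 0, which replicate m.toNat matches)
    let poles : List Int := arr.foldl (fun p v =>
        (PySem.List.pyRange 0 v 1).foldl (fun p j =>
            PySem.List.pySetD p j (PySem.List.pyGetD p j 0 + 1)) p)
      (List.replicate m.toNat 0)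
    -- [sum(1 for h in poles if h >= n - i) for i in range(n)]  (sum of ones = countP)
    (List.range n).map (fun i => (poles.countP (fun h => decide ((n : Int) - (i : Nat) ≤ h)) : Int))

-- ===== PRECONDITION & SPEC =====
-- Pre_ excludes only the lists whose maximum is 0 but that contain a negative
-- value, a corner outside the bead-sort domain (non-negative integers): there A's
-- 'max == 0' early exit returns the list unchanged while B's gravity read-back
-- yields all zeros, and neither value is canonical for a bead sort fed negatives.
def Pre_gravity_sort_bitparallel (arr : List Int) : Prop :=
  ¬ (0 ∈ arr ∧ (∀ x ∈ arr, x ≤ 0) ∧ ∃ x ∈ arr, x < 0)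
instance (arr : List Int) : Decidable (Pre_gravity_sort_bitparallel arr) := by
  unfold Pre_gravity_sort_bitparallel; infer_instance

def pvWitness_gravity_sort_bitparallel : List Int := [2, 0, 3, 1, 2]

def Spec_gravity_sort_bitparallel (arr : List Int) (out : List Int) : Prop := out = gravity_sort_bitparallel_alt arr
instance (arr : List Int) (out : List Int) : Decidable (Spec_gravity_sort_bitparallel arr out) := by unfold Spec_gravity_sort_bitparallel; infer_instance

-- ===== CLAIM (what is proved, stated in full; the proofs are below) =====
def Claim_equal_gravity_sort_bitparallel : Prop := ∀ (arr : List Int), Dom_gravity_sort_bitparallel arr → Pre_gravity_sort_bitparallel arr → Spec_gravity_sort_bitparallel arr (gravity_sort_bitparallel arr)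

-- ===== LEMMAS AND PROOFS =====

-- the bead column j of arr as a natural-number bit mask: bit k is set iff arr[k] > j
def pvMask : List Int → Int → Nat
  | [], _ => 0
  | a :: t, j => (if j < a then 1 else 0) + 2 * pvMask t j

theorem pv_bc_two_mul (y : Nat) : PySem.Int.bitCount ((2 * y : Nat) : Int) = PySem.Int.bitCount (y : Int) := by
  rcases Nat.eq_zero_or_pos y with h | h
  · subst h; rfl
  · rw [PySem.Int.bitCount_natCast (by omega : 0 < 2 * y)]
    have : 2 * y / 2 = y := by omega
    rw [this]; omega

theorem pv_bc_odd (y : Nat) : PySem.Int.bitCount ((2 * y + 1 : Nat) : Int) = PySem.Int.bitCount (y : Int) + 1 := by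
  rw [PySem.Int.bitCount_natCast (by omega : 0 < 2 * y + 1)]
  have : (2 * y + 1) / 2 = y := by omega
  rw [this]; omega

theorem pv_odd_land (k : Nat) : (2 * k + 1) &&& (2 * k) = 2 * k := by
  apply Nat.eq_of_testBit_eq
  intro i
  have h1 : (2 * k + 1) / 2 = k := by omega
  have h2 : 2 * k / 2 = k := by omega
  rw [Nat.testBit_land]
  cases i with
  | zero => simp [Nat.testBit_zero]
  | succ i => simp only [Nat.testBit_succ, h1, h2, Bool.and_self]

theorem pv_even_land (k : Nat) (hk : 0 < k) : (2 * k) &&& (2 * k - 1) = 2 * (k &&& (k - 1)) := by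
  apply Nat.eq_of_testBit_eq
  intro i
  have h1 : 2 * k / 2 = k := by omega
  have h2 : (2 * k - 1) / 2 = k - 1 := by omega
  have h3 : 2 * (k &&& (k - 1)) / 2 = k &&& (k - 1) := by omega
  rw [Nat.testBit_land]
  cases i with
  | zero => simp [Nat.testBit_zero]
  | succ i =>
    simp only [Nat.testBit_succ, h1, h2, h3]
    rw [Nat.testBit_land]

theorem pv_kern (m : Nat) (h : 0 < m) :
    PySem.Int.bitCount ((m &&& (m - 1) : Nat) : Int) + 1 = PySem.Int.bitCount (m : Int) := by
  induction m using Nat.strong_induction_on with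
  | _ m ih =>
    rcases Nat.even_or_odd m with ⟨k, hk⟩ | ⟨k, hk⟩
    · have hk' : m = 2 * k := by omega
      have hkpos : 0 < k := by omega
      subst hk'
      rw [pv_even_land k hkpos, pv_bc_two_mul, pv_bc_two_mul]
      exact ih k (by omega) hkpos
    · have hk' : m = 2 * k + 1 := by omega
      subst hk'
      have h2 : 2 * k + 1 - 1 = 2 * k := by omega
      rw [h2, pv_odd_land, pv_bc_two_mul, pv_bc_odd]

theorem pv_pvPop_eq (m : Nat) (c : Int) :
    pvPop (m : Int) c = c + (PySem.Int.bitCount (m : Int) : Int) := by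
  induction m using Nat.strong_induction_on generalizing c with
  | _ m ih =>
    rw [pvPop]
    rcases Nat.eq_zero_or_pos m with h | h
    · subst h; simp
    · rw [dif_pos (by exact_mod_cast h)]
      have h1 : (m : Int) - 1 = ((m - 1 : Nat) : Int) := by omega
      rw [h1, PySem.Int.band_natCast]
      rw [ih (m &&& (m - 1)) (by have := @Nat.and_le_right m (m - 1); omega) (c + 1)]
      have := pv_kern m h
      omega

theorem pv_or_add {s m : Nat} (h : m < 2 ^ s) : m ||| 2 ^ s = m + 2 ^ s := by
  apply Nat.eq_of_testBit_eq
  intro i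
  rw [Nat.testBit_lor, Nat.testBit_eq_decide_div_mod_eq, Nat.testBit_eq_decide_div_mod_eq, Nat.testBit_eq_decide_div_mod_eq]
  rcases lt_trichotomy i s with hi | hi | hi
  · -- i < s : 2^s = 2^i * 2^(s-i), adding even multiple
    have hd : 2 ^ s = 2 ^ i * 2 ^ (s - i) := by rw [← pow_add]; congr 1; omega
    have h2 : (m + 2 ^ s) / 2 ^ i = m / 2 ^ i + 2 ^ (s - i) := by
      rw [hd, Nat.add_mul_div_left _ _ ((by positivity : 0 < 2 ^ i))]
    have h3 : 2 ^ s / 2 ^ i = 2 ^ (s - i) := by rw [hd]; exact Nat.mul_div_cancel_left _ ((by positivity : 0 < 2 ^ i))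
    have h4 : 2 ^ (s - i) % 2 = 0 := by
      have : ∃ t, s - i = t + 1 := ⟨s - i - 1, by omega⟩
      obtain ⟨t, ht⟩ := this
      rw [ht, pow_succ]; omega
    rw [h2, h3]
    have h6 : decide (2 ^ (s - i) % 2 = 1) = false := by simp; omega
    have h7 : (m / 2 ^ i + 2 ^ (s - i)) % 2 = m / 2 ^ i % 2 := by omega
    rw [h6, Bool.or_false, h7]
  · subst hi
    have h1 : m / 2 ^ i = 0 := Nat.div_eq_of_lt h
    have h2 : (m + 2 ^ i) / 2 ^ i = 1 := by
      rw [Nat.add_div_right _ ((by positivity : 0 < 2 ^ i)), h1]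
    have h3 : 2 ^ i / 2 ^ i = 1 := Nat.div_self ((by positivity : 0 < 2 ^ i))
    rw [h1, h2, h3]
    simp
  · -- i > s
    have hlt : m + 2 ^ s < 2 ^ i := by
      have : 2 ^ (s + 1) ≤ 2 ^ i := Nat.pow_le_pow_right (by norm_num) (by omega)
      rw [pow_succ] at this; omega
    have h1 : m / 2 ^ i = 0 := Nat.div_eq_of_lt (by omega)
    have h2 : (m + 2 ^ s) / 2 ^ i = 0 := Nat.div_eq_of_lt hlt
    have h3 : 2 ^ s / 2 ^ i = 0 := Nat.div_eq_of_lt (Nat.pow_lt_pow_right (by norm_num) hi)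
    rw [h1, h2, h3]
    simp

theorem pv_bc_mask (l : List Int) (j : Int) :
    PySem.Int.bitCount ((pvMask l j : Nat) : Int) = l.countP (fun v => decide (j < v)) := by
  induction l with
  | nil => simp [pvMask]
  | cons a t ih =>
    simp only [pvMask, List.countP_cons]
    by_cases h : j < a
    · rw [if_pos h]
      have : 1 + 2 * pvMask t j = 2 * pvMask t j + 1 := by omega
      rw [this, pv_bc_odd, ih]
      simp [h]
    · rw [if_neg h]
      have : 0 + 2 * pvMask t j = 2 * pvMask t j := by omega
      rw [this, pv_bc_two_mul, ih]
      simp [h]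

theorem pv_packed (c k : Nat) :
    ((1:Int) <<< c - 1) <<< k = (((2 ^ c - 1) * 2 ^ k : Nat) : Int) := by
  rw [Int.shiftLeft_eq, Int.shiftLeft_eq]
  have h : (1:Nat) ≤ 2 ^ c := Nat.one_le_two_pow
  push_cast [h]
  ring

-- bit i of the packed mask (c ≤ N set bits, packed at positions N-c .. N-1)
theorem pv_bit (c N i : Nat) (hc : c ≤ N) (hi : i < N) :
    PySem.Int.band (((2 ^ c - 1) * 2 ^ (N - c) : Nat) : Int) ((1:Int) <<< i) ≠ 0 ↔ N - c ≤ i := by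
  rw [show ((1:Int) <<< i) = ((2 ^ i : Nat) : Int) by
        rw [Int.shiftLeft_eq]; push_cast; ring]
  rw [PySem.Int.band_natCast, Nat.and_two_pow, Nat.testBit_mul_two_pow,
      Nat.testBit_two_pow_sub_one]
  constructor
  · intro h
    by_contra hni
    simp [hni] at h
  · intro h
    have h2 : i - (N - c) < c := by omega
    simp [h, h2]

theorem pv_inner_nat (p : Int) (v : Nat) (c : List Int) (hv : v ≤ c.length) :
    (PySem.List.pyRange 0 (v : Int) 1).foldl (fun c j =>
        PySem.List.pySetD c j (PySem.Int.bor (PySem.List.pyGetD c j 0) p)) c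
    = c.mapIdx (fun j x => if j < v then PySem.Int.bor x p else x) := by
  induction v with
  | zero =>
    rw [show ((0:Nat) : Int) = 0 by rfl, PySem.List.pyRange_one_eq_nil le_rfl]
    simp only [List.foldl_nil]
    apply List.ext_getElem (by simp)
    intro j h1 h2
    simp [List.getElem_mapIdx]
  | succ v ih =>
    have hcast : ((v + 1 : Nat) : Int) = (v : Int) + 1 := by push_cast; ring
    rw [hcast, PySem.List.pyRange_one_succ_right (by positivity), List.foldl_append]
    rw [ih (by omega)]
    set c' := c.mapIdx (fun j x => if j < v then PySem.Int.bor x p else x) with hc'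
    have hlen : c'.length = c.length := List.length_mapIdx
    have hvlt : v < c'.length := by omega
    simp only [List.foldl_cons, List.foldl_nil]
    rw [PySem.List.pyGetD_natCast c' v 0]
    rw [show PySem.List.pySetD c' (v : Int)
          (PySem.Int.bor (c'.getD v 0) p) = c'.set v (PySem.Int.bor (c'.getD v 0) p) by
      simp [PySem.List.pySetD, PySem.List.pySet?_natCast c' v _ hvlt]]
    apply List.ext_getElem (by simp [hlen])
    intro j h1 h2
    have hj2 : j < c.length := by
      simp only [List.length_mapIdx] at h2
      exact h2
    simp only [List.getElem_set]
    have hvc : v < c.length := by omega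
    have hgd : c'.getD v 0 = c.getD v 0 := by
      rw [List.getD_eq_getElem c' 0 hvlt, List.getD_eq_getElem c 0 hvc]
      simp only [hc', List.getElem_mapIdx]
      rw [if_neg (lt_irrefl v)]
    by_cases hjv : v = j
    · subst hjv
      rw [if_pos rfl, hgd, List.getD_eq_getElem c 0 hvc]
      simp only [List.getElem_mapIdx]
      rw [if_pos (by omega)]
    · rw [if_neg hjv]
      simp only [hc', List.getElem_mapIdx]
      have : j < c.length := by omega
      by_cases hj : j < v
      · rw [if_pos hj, if_pos (by omega)]
      · rw [if_neg hj, if_neg (by omega)]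

theorem pv_inner (p : Int) (val : Int) (c : List Int) (hv : val ≤ (c.length : Int)) :
    (PySem.List.pyRange 0 val 1).foldl (fun c j =>
        PySem.List.pySetD c j (PySem.Int.bor (PySem.List.pyGetD c j 0) p)) c
    = c.mapIdx (fun j x => if (j : Int) < val then PySem.Int.bor x p else x) := by
  rcases le_or_gt val 0 with h | h
  · rw [PySem.List.pyRange_one_eq_nil h, List.foldl_nil]
    apply List.ext_getElem (by simp)
    intro j h1 h2
    rw [List.getElem_mapIdx, if_neg (by omega)]
  · have hval : val = (val.toNat : Int) := by omega
    rw [hval, pv_inner_nat p val.toNat c (by omega)]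
    apply List.ext_getElem (by simp)
    intro j h1 h2
    rw [List.getElem_mapIdx, List.getElem_mapIdx]
    by_cases hj : j < val.toNat
    · rw [if_pos hj, if_pos (by omega)]
    · rw [if_neg hj, if_neg (by omega)]

theorem pv_build (xs : List Int) : ∀ (s M : Nat) (g : Nat → Nat),
    (∀ x ∈ xs, x ≤ (M : Int)) → (∀ j, g j < 2 ^ s) →
    (PySem.List.enumerate xs s).foldl (fun cols iv =>
        (PySem.List.pyRange 0 iv.2 1).foldl (fun c j =>
            PySem.List.pySetD c j (PySem.Int.bor (PySem.List.pyGetD c j 0) ((1:Int) <<< iv.1.toNat))) cols)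
      ((List.range M).map (fun (j : Nat) => ((g j : Nat) : Int)))
    = (List.range M).map (fun (j : Nat) => ((g j + 2 ^ s * pvMask xs (j : Int) : Nat) : Int)) := by
  induction xs with
  | nil =>
    intro s M g _ _
    simp [PySem.List.enumerate, pvMask]
  | cons a t ih =>
    intro s M g hub hg
    rw [PySem.List.enumerate_cons, List.foldl_cons]
    rw [show (((s : Nat) : Int), a).1 = ((s : Nat) : Int) from rfl,
        show (((s : Nat) : Int), a).2 = a from rfl, Int.toNat_natCast]
    have hlen : ((List.range M).map (fun (j : Nat) => ((g j : Nat) : Int))).length = M := by simp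
    rw [pv_inner _ a _ (by simp only [List.length_map, List.length_range]; exact hub a List.mem_cons_self)]
    have hstep : (((List.range M).map (fun (j : Nat) => ((g j : Nat) : Int))).mapIdx
          (fun j x => if (j : Int) < a then PySem.Int.bor x ((1:Int) <<< ((s : Nat) : Int)) else x))
        = (List.range M).map (fun (j : Nat) =>
            (((if (j : Int) < a then g j + 2 ^ s else g j) : Nat) : Int) ) := by
      apply List.ext_getElem (by simp)
      intro j h1 h2
      rw [List.getElem_mapIdx]
      simp only [List.getElem_map, List.getElem_range]
      have hsh : (1:Int) <<< ((s : Nat) : Int) = ((2 ^ s : Nat) : Int) := Int.one_shiftLeft s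
      by_cases hj : ((j : Int)) < a
      · rw [if_pos hj, if_pos hj, hsh, PySem.Int.bor_natCast, pv_or_add (hg j)]
      · rw [if_neg hj, if_neg hj]
    rw [hstep]
    rw [show ((s : Int) + 1) = ((s + 1 : Nat) : Int) by push_cast; ring]
    rw [ih (s + 1) M (fun j => if (j : Int) < a then g j + 2 ^ s else g j)
        (fun x hx => hub x (List.mem_cons_of_mem a hx))
        (by
          intro j
          show (if ((j : Nat) : Int) < a then g j + 2 ^ s else g j) < 2 ^ (s + 1)
          have := hg j
          rw [pow_succ]
          split <;> omega)]
    apply List.map_congr_left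
    intro j hj
    congr 1
    rw [pow_succ]
    simp only [pvMask]
    split <;> ring

theorem pv_read_inner (col : Int) (k : Nat) (r : List Int) (hk : k ≤ r.length) :
    (List.range k).foldl (fun r (i : Nat) =>
        if PySem.Int.band col ((1:Int) <<< (i : Nat)) ≠ 0 then r.modify i (· + 1) else r) r
    = r.mapIdx (fun i x => if i < k ∧ PySem.Int.band col ((1:Int) <<< (i : Nat)) ≠ 0 then x + 1 else x) := by
  induction k with
  | zero =>
    simp only [List.range_zero, List.foldl_nil]
    apply List.ext_getElem (by simp)
    intro j h1 h2
    rw [List.getElem_mapIdx, if_neg (by omega)]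
  | succ k ih =>
    rw [List.range_succ, List.foldl_append, ih (by omega), List.foldl_cons, List.foldl_nil]
    by_cases hc : PySem.Int.band col ((1:Int) <<< (k : Nat)) ≠ 0
    · rw [if_pos hc]
      apply List.ext_getElem (by simp)
      intro j h1 h2
      have hj : j < r.length := by simp only [List.length_mapIdx] at h2; exact h2
      rw [List.getElem_modify, List.getElem_mapIdx, List.getElem_mapIdx]
      by_cases hjk : k = j
      · subst hjk
        rw [if_pos rfl, if_neg (by omega), if_pos ⟨by omega, hc⟩]
      · rw [if_neg hjk]
        by_cases hj2 : j < k ∧ PySem.Int.band col ((1:Int) <<< (j : Nat)) ≠ 0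
        · rw [if_pos hj2, if_pos ⟨by omega, hj2.2⟩]
        · rw [if_neg hj2, if_neg (by rintro ⟨h3, h4⟩; exact hj2 ⟨by omega, h4⟩)]
    · rw [if_neg hc]
      apply List.ext_getElem (by simp)
      intro j h1 h2
      rw [List.getElem_mapIdx, List.getElem_mapIdx]
      by_cases hj2 : j < k ∧ PySem.Int.band col ((1:Int) <<< (j : Nat)) ≠ 0
      · rw [if_pos hj2, if_pos ⟨by omega, hj2.2⟩]
      · rw [if_neg hj2, if_neg (by
          rintro ⟨h3, h4⟩
          rcases Nat.lt_succ_iff_lt_or_eq.mp h3 with h5 | h5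
          · exact hj2 ⟨h5, h4⟩
          · subst h5; exact hc h4)]

theorem pv_read (cols : List Int) (N : Nat) : ∀ (r : List Int), r.length = N →
    cols.foldl (fun res col =>
        (List.range N).foldl (fun r (i : Nat) =>
            if PySem.Int.band col ((1:Int) <<< (i : Nat)) ≠ 0 then r.modify i (· + 1) else r) res) r
    = r.mapIdx (fun i x => x + (cols.countP (fun col => PySem.Int.band col ((1:Int) <<< (i : Nat)) ≠ 0) : Int)) := by
  induction cols with
  | nil =>
    intro r hr
    simp only [List.foldl_nil, List.countP_nil]
    apply List.ext_getElem (by simp)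
    intro j h1 h2
    rw [List.getElem_mapIdx]
    simp
  | cons col rest ih =>
    intro r hr
    rw [List.foldl_cons, pv_read_inner col N r (by omega)]
    rw [ih _ (by simp [hr])]
    apply List.ext_getElem (by simp)
    intro j h1 h2
    have hj : j < r.length := by simp only [List.length_mapIdx] at h1; exact h1
    rw [List.getElem_mapIdx, List.getElem_mapIdx, List.getElem_mapIdx]
    rw [List.countP_cons]
    have hjN : j < N := by omega
    by_cases hc : PySem.Int.band col ((1:Int) <<< (j : Nat)) ≠ 0
    · rw [if_pos ⟨hjN, hc⟩]
      simp only [decide_eq_true hc, if_true]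
      push_cast
      ring
    · rw [if_neg (by rintro ⟨_, h4⟩; exact hc h4)]
      simp only [decide_eq_false hc, if_false]
      push_cast
      ring

theorem pv_innerB_nat (v : Nat) (c : List Int) (hv : v ≤ c.length) :
    (PySem.List.pyRange 0 (v : Int) 1).foldl (fun c j =>
        PySem.List.pySetD c j (PySem.List.pyGetD c j 0 + 1)) c
    = c.mapIdx (fun j x => if j < v then x + 1 else x) := by
  induction v with
  | zero =>
    rw [show ((0:Nat) : Int) = 0 by rfl, PySem.List.pyRange_one_eq_nil le_rfl]
    simp only [List.foldl_nil]
    apply List.ext_getElem (by simp)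
    intro j h1 h2
    simp [List.getElem_mapIdx]
  | succ v ih =>
    have hcast : ((v + 1 : Nat) : Int) = (v : Int) + 1 := by push_cast; ring
    rw [hcast, PySem.List.pyRange_one_succ_right (by positivity), List.foldl_append]
    rw [ih (by omega)]
    set c' := c.mapIdx (fun j x => if j < v then x + 1 else x) with hc'
    have hlen : c'.length = c.length := List.length_mapIdx
    have hvlt : v < c'.length := by omega
    simp only [List.foldl_cons, List.foldl_nil]
    rw [PySem.List.pyGetD_natCast c' v 0]
    rw [show PySem.List.pySetD c' (v : Int)
          (c'.getD v 0 + 1) = c'.set v (c'.getD v 0 + 1) by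
      simp [PySem.List.pySetD, PySem.List.pySet?_natCast c' v _ hvlt]]
    apply List.ext_getElem (by simp [hlen])
    intro j h1 h2
    have hj2 : j < c.length := by
      simp only [List.length_mapIdx] at h2
      exact h2
    simp only [List.getElem_set]
    have hvc : v < c.length := by omega
    have hgd : c'.getD v 0 = c.getD v 0 := by
      rw [List.getD_eq_getElem c' 0 hvlt, List.getD_eq_getElem c 0 hvc]
      simp only [hc', List.getElem_mapIdx]
      rw [if_neg (lt_irrefl v)]
    by_cases hjv : v = j
    · subst hjv
      rw [if_pos rfl, hgd, List.getD_eq_getElem c 0 hvc]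
      simp only [List.getElem_mapIdx]
      rw [if_pos (by omega)]
    · rw [if_neg hjv]
      simp only [hc', List.getElem_mapIdx]
      have : j < c.length := by omega
      by_cases hj : j < v
      · rw [if_pos hj, if_pos (by omega)]
      · rw [if_neg hj, if_neg (by omega)]

theorem pv_innerB (val : Int) (c : List Int) (hv : val ≤ (c.length : Int)) :
    (PySem.List.pyRange 0 val 1).foldl (fun c j =>
        PySem.List.pySetD c j (PySem.List.pyGetD c j 0 + 1)) c
    = c.mapIdx (fun j x => if (j : Int) < val then x + 1 else x) := by
  rcases le_or_gt val 0 with h | h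
  · rw [PySem.List.pyRange_one_eq_nil h, List.foldl_nil]
    apply List.ext_getElem (by simp)
    intro j h1 h2
    rw [List.getElem_mapIdx, if_neg (by omega)]
  · have hval : val = (val.toNat : Int) := by omega
    rw [hval, pv_innerB_nat val.toNat c (by omega)]
    apply List.ext_getElem (by simp)
    intro j h1 h2
    rw [List.getElem_mapIdx, List.getElem_mapIdx]
    by_cases hj : j < val.toNat
    · rw [if_pos hj, if_pos (by omega)]
    · rw [if_neg hj, if_neg (by omega)]

-- dropping all beads onto the poles leaves pole j at height (count of v > j)
theorem pv_polesB (xs : List Int) : ∀ (M : Nat) (g : Nat → Int),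
    (∀ x ∈ xs, x ≤ (M : Int)) →
    xs.foldl (fun p v =>
        (PySem.List.pyRange 0 v 1).foldl (fun p j =>
            PySem.List.pySetD p j (PySem.List.pyGetD p j 0 + 1)) p)
      ((List.range M).map (fun j => g j))
    = (List.range M).map (fun j => g j + (xs.countP (fun v => decide ((j : Int) < v)) : Int)) := by
  induction xs with
  | nil =>
    intro M g _
    simp
  | cons a t ih =>
    intro M g hub
    rw [List.foldl_cons]
    rw [pv_innerB a _ (by simp only [List.length_map, List.length_range]; exact hub a List.mem_cons_self)]
    have hstep : (((List.range M).map (fun j => g j)).mapIdx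
          (fun j x => if (j : Int) < a then x + 1 else x))
        = (List.range M).map (fun (j : Nat) => if (j : Int) < a then g j + 1 else g j) := by
      apply List.ext_getElem (by simp)
      intro j h1 h2
      rw [List.getElem_mapIdx]
      simp only [List.getElem_map, List.getElem_range]
    rw [hstep,
        ih M (fun (j : Nat) => if (j : Int) < a then g j + 1 else g j)
          (fun x hx => hub x (List.mem_cons_of_mem a hx))]
    apply List.map_congr_left
    intro j hj
    rw [List.countP_cons]
    by_cases h : (j : Int) < a
    · simp only [if_pos h, decide_eq_true h]
      push_cast
      ring
    · simp only [if_neg h, decide_eq_false h]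
      push_cast
      ring

-- B's value: row i counts the poles of height at least n - i
theorem pv_B_eval (arr : List Int) (harr : arr ≠ []) (m0 : Int)
    (hm : PySem.List.max? arr (fun x => x) = some m0) :
    gravity_sort_bitparallel_alt arr
    = (List.range arr.length).map (fun (i : Nat) =>
        (((List.range m0.toNat).countP (fun (j : Nat) =>
          decide ((arr.length : Int) - (i : Nat)
            ≤ (arr.countP (fun v => decide ((j : Int) < v)) : Int)))) : Int)) := by
  have hub := PySem.List.max?_id_le hm
  simp only [gravity_sort_bitparallel_alt, if_neg harr, hm]
  have hrep : List.replicate m0.toNat (0:Int)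
      = (List.range m0.toNat).map (fun (j : Nat) => (fun (_ : Nat) => (0:Int)) j) := by
    apply List.ext_getElem <;> simp
  rw [hrep, pv_polesB arr m0.toNat (fun _ => 0)
      (fun x hx => by have := hub x hx; omega)]
  apply List.map_congr_left
  intro i hi
  rw [List.countP_map]
  congr 1
  apply List.countP_congr
  intro j hj
  simp [Function.comp]

theorem pv_main (arr : List Int) (hpre : Pre_gravity_sort_bitparallel arr) :
    gravity_sort_bitparallel arr = gravity_sort_bitparallel_alt arr := by
  by_cases harr : arr = []
  · subst harr; rfl
  · obtain ⟨m0, hm⟩ : ∃ m0, PySem.List.max? arr (fun x => x) = some m0 := by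
      cases hmx : PySem.List.max? arr (fun x => x) with
      | none => exact absurd ((PySem.List.max?_eq_none_iff arr _).mp hmx) harr
      | some m0 => exact ⟨m0, rfl⟩
    have hub := PySem.List.max?_id_le hm
    rw [pv_B_eval arr harr m0 hm]
    by_cases hz : m0 = 0
    · -- max = 0: Pre_ rules out a negative element, so arr is all zeros,
      -- and both sides are [0] * n
      have h0mem : (0:Int) ∈ arr := hz ▸ PySem.List.max?_mem hm
      have hle : ∀ x ∈ arr, x ≤ 0 := fun x hx => by have := hub x hx; omega
      have hall : ∀ x ∈ arr, x = 0 := by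
        intro x hx
        by_contra hne
        exact hpre ⟨h0mem, hle, ⟨x, hx, by have := hle x hx; omega⟩⟩
      simp only [gravity_sort_bitparallel, if_neg harr, hm, if_pos hz]
      subst hz
      apply List.ext_getElem (by simp)
      intro i h1 h2
      simp only [List.getElem_map, List.getElem_range]
      rw [hall arr[i] (List.getElem_mem h1)]
      norm_num
    · -- max ≠ 0: run A's bit machinery down to the same count of columns
      simp only [gravity_sort_bitparallel, if_neg harr, hm, if_neg hz]
      have hrep : List.replicate m0.toNat (0:Int)
          = (List.range m0.toNat).map (fun (j : Nat) => (((fun (_ : Nat) => (0:Nat)) j : Nat) : Int)) := by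
        apply List.ext_getElem <;> simp
      rw [hrep, show PySem.List.enumerate arr = PySem.List.enumerate arr (((0:Nat)) : Int) by norm_num,
          pv_build arr 0 m0.toNat (fun _ => 0)
            (fun x hx => by have := hub x hx; omega) (fun j => by norm_num)]
      rw [List.map_map]
      have hcols2 : (List.range m0.toNat).map
            ((fun col =>
              ((1:Int) <<< (pvPop col 0).toNat - 1) <<< ((arr.length : Int) - pvPop col 0).toNat)
             ∘ (fun (j : Nat) => ((((fun _ => 0) j : Nat) + 2 ^ 0 * pvMask arr (j : Int) : Nat) : Int)))
          = (List.range m0.toNat).map (fun (j : Nat) =>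
              (((2 ^ (arr.countP (fun v => decide ((j : Int) < v))) - 1)
                * 2 ^ (arr.length - arr.countP (fun v => decide ((j : Int) < v))) : Nat) : Int)) := by
        apply List.map_congr_left
        intro j hj
        simp only [Function.comp_apply, pow_zero, one_mul, Nat.zero_add]
        rw [pv_pvPop_eq (pvMask arr (j : Int)) 0, pv_bc_mask, zero_add]
        have hle : arr.countP (fun v => decide ((j : Int) < v)) ≤ arr.length :=
          List.countP_le_length
        rw [Int.toNat_natCast]
        rw [show ((arr.length : Int) - (arr.countP (fun v => decide ((j : Int) < v)) : Int)).toNat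
              = arr.length - arr.countP (fun v => decide ((j : Int) < v)) by omega]
        exact pv_packed (arr.countP (fun v => decide ((j : Int) < v)))
          (arr.length - arr.countP (fun v => decide ((j : Int) < v)))
      rw [hcols2, pv_read _ arr.length (List.replicate arr.length 0) List.length_replicate]
      apply List.ext_getElem (by simp)
      intro i h1 h2
      have hi' : i < arr.length := by
        simp only [List.length_mapIdx, List.length_replicate] at h1
        exact h1
      rw [List.getElem_mapIdx, List.getElem_replicate, List.countP_map,
          List.getElem_map, List.getElem_range]
      have hq : ∀ (p q : Nat → Bool), (∀ j ∈ List.range m0.toNat, p j = q j) →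
          (List.range m0.toNat).countP p = (List.range m0.toNat).countP q :=
        fun p q h => List.countP_congr (fun x hx => by rw [h x hx])
      rw [hq _ (fun (j : Nat) =>
            decide ((arr.length : Int) - (i : Nat)
              ≤ (arr.countP (fun v => decide ((j : Int) < v)) : Int))) ?_]
      · ring
      · intro j hj
        simp only [Function.comp_apply]
        rw [decide_eq_decide]
        have hc : arr.countP (fun v => decide ((j : Int) < v)) ≤ arr.length :=
          List.countP_le_length
        have hb := pv_bit (arr.countP (fun v => decide ((j : Int) < v))) arr.length i hc hi'
        constructor
        · intro h
          have := hb.mp h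
          omega
        · intro h
          exact hb.mpr (by omega)

-- ===== VERDICT (by name: the statement is the Claim_ definition above) =====
theorem gravity_sort_bitparallel_spec : Claim_equal_gravity_sort_bitparallel := by
  intro arr _hdom hpre
  unfold Spec_gravity_sort_bitparallel
  exact pv_main arr hpre
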